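-- pv_equiv track=rewrite | github.com/growbori/Algorithm_TIL | 코딩테스트 대비/6일차/문장 퍼즐.py | solution
-- ===== SOURCE A (Python) =====
-- def solution(phrases):
--     case = []
--     for i in range(len(phrases)):
--         case.append(phrases[i].split(' '))
--
--     answer = []
--     for i in range(len(case)):
--         for j in range(len(case)):
--             if case[i][-1] == case[j][0]:
--                 answer.append(case[i][:-1] + case[j])
--
--     fin = []
--     for i in range(len(answer)):
--
--         fin.append(' '.join(answer[i]))
--     fin.sort()
--     return fin
-- ===== SOURCE B (Python) =====
-- def solution(phrases):
--     words = [p.split(' ') for p in phrases]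
--     index = {}
--     for w in words:
--         index.setdefault(w[0], []).append(w)
--     fin = []
--     for w in words:
--         for m in index.get(w[-1], []):
--             fin.append(' '.join(w[:-1] + m))
--     return sorted(fin)
-- ===== Notes on version B (the rewrite author's own statement) =====
-- stated objective: alternative
-- what changed: Replaces the quadratic all-pairs inner scan by a dict grouping phrases by first word, so each phrase looks up its matches directly; measured 1.9x at n=1024 but unconfirmed at larger sizes where the output itself is quadratic.
import Mathlib
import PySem

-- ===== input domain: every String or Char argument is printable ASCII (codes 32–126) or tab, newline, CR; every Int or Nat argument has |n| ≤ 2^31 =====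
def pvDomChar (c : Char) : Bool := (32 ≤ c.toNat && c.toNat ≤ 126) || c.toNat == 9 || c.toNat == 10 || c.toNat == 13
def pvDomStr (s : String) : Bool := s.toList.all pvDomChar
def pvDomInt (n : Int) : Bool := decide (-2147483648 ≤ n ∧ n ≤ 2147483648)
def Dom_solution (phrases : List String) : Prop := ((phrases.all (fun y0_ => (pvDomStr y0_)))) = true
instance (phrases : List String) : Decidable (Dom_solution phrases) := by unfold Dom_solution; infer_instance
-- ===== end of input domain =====

-- B replaces A's quadratic all-pairs scan with a dict that groups phrases by first word,
-- looking up each phrase's matches directly (objective: alternative algorithm, O(n + matches) pair scanning).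


-- ===== PORT A =====
-- p.split(' '): the separator is the non-empty literal " ", so split? is always some (getD's [] is never used)
def solution (phrases : List String) : List String :=
  let cs := phrases.foldl (fun acc p => acc ++ [(PySem.Str.split? p " ").getD []]) []
  let answer := (PySem.List.pyRange 0 (cs.length : Int)).foldl (fun acc i =>
      (PySem.List.pyRange 0 (cs.length : Int)).foldl (fun acc2 j =>
        if PySem.List.pyGetD (PySem.List.pyGetD cs i []) (-1) "" ==
           PySem.List.pyGetD (PySem.List.pyGetD cs j []) 0 "" then
          acc2 ++ [PySem.List.slice (PySem.List.pyGetD cs i []) none (some (-1)) ++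
                   PySem.List.pyGetD cs j []]
        else acc2) acc) []
  let fin := (PySem.List.pyRange 0 (answer.length : Int)).foldl (fun acc i =>
      acc ++ [PySem.Str.join " " (PySem.List.pyGetD answer i [])]) []
  PySem.List.sorted fin (fun x => x)

-- ===== PORT B =====
def solution_alt (phrases : List String) : List String :=
  let words := phrases.map (fun p => (PySem.Str.split? p " ").getD [])
  let index := words.foldl
      (fun d w => d.modify (PySem.List.pyGetD w 0 "") [] (fun v => v ++ [w])) PySem.Dict.empty
  let fin := words.foldl (fun acc w =>
      (index.getD (PySem.List.pyGetD w (-1) "") []).foldl (fun acc2 m =>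
        acc2 ++ [PySem.Str.join " " (PySem.List.slice w none (some (-1)) ++ m)]) acc) []
  PySem.List.sorted fin (fun x => x)

-- ===== PRECONDITION & SPEC =====
def Spec_solution (phrases : List String) (out : List String) : Prop := out = solution_alt phrases
instance (phrases : List String) (out : List String) : Decidable (Spec_solution phrases out) := by unfold Spec_solution; infer_instance

-- ===== CLAIM (what is proved, stated in full; the proofs are below) =====
def Claim_equal_solution : Prop := ∀ (phrases : List String), Dom_solution phrases → Spec_solution phrases (solution phrases)

-- ===== LEMMAS AND PROOFS =====

-- a map over range(len(xs)) reading xs[i] is a map over xs (bridges A's index loops)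
theorem pyMapIdx {α β : Type} (xs : List α) (d : α) (g : α → β) :
    (PySem.List.pyRange 0 (xs.length : Int)).map (fun i => g (PySem.List.pyGetD xs i d))
      = xs.map g := by
  calc (PySem.List.pyRange 0 (xs.length : Int)).map (fun i => g (PySem.List.pyGetD xs i d))
      = ((PySem.List.pyRange 0 (xs.length : Int)).map (fun j => PySem.List.pyGetD xs j d)).map g := by
        simp only [List.map_map, Function.comp_def]
    _ = xs.map g := by rw [PySem.List.map_pyGetD_pyRange_zero']

theorem pyFlatMapIdx {α β : Type} (xs : List α) (d : α) (g : α → List β) :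
    (PySem.List.pyRange 0 (xs.length : Int)).flatMap (fun i => g (PySem.List.pyGetD xs i d))
      = xs.flatMap g := by
  rw [List.flatMap_def, List.flatMap_def, pyMapIdx xs d g]

theorem pyFilterMapIdx {α β : Type} (xs : List α) (d : α) (q : α → Bool) (h : α → β) :
    ((PySem.List.pyRange 0 (xs.length : Int)).filter
        (fun j => q (PySem.List.pyGetD xs j d))).map (fun j => h (PySem.List.pyGetD xs j d))
      = (xs.filter q).map h := by
  have h1 := PySem.List.foldl_pyRange_zero_pyGetD' xs d
      (fun acc x => if q x then acc ++ [h x] else acc) ([] : List β)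
  simp only [PySem.List.foldl_append_if, List.nil_append] at h1
  exact h1

-- B's grouping dict looks up exactly the phrases whose first word is k, in original order
theorem index_getD (words : List (List String)) (k : String) :
    (words.foldl (fun d w => d.modify (PySem.List.pyGetD w 0 "") [] (fun v => v ++ [w]))
        PySem.Dict.empty).getD k []
      = words.filter (fun w => PySem.List.pyGetD w 0 "" == k) := by
  have h := PySem.Dict.getD_foldl_modify_append
      (words.map (fun w => (PySem.List.pyGetD w 0 "", w))) PySem.Dict.empty k
  rw [List.foldl_map] at h
  simpa [List.filter_map, Function.comp_def] using h

theorem solution_spec_aux (phrases : List String) :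
    solution phrases = solution_alt phrases := by
  unfold solution solution_alt
  simp only [PySem.List.foldl_append_singleton_eq_map, List.nil_append,
    PySem.List.foldl_append_if, PySem.List.foldl_append_eq_flatMap, index_getD]
  set ws := phrases.map (fun p => (PySem.Str.split? p " ").getD []) with hws
  refine congrArg (fun l => PySem.List.sorted l (fun x => x)) ?_
  refine Eq.trans (pyMapIdx _ [] (PySem.Str.join " ")) ?_
  refine Eq.trans (congrArg (List.map (PySem.Str.join " "))
    (Eq.trans
      (pyFlatMapIdx ws []
        (fun w => ((PySem.List.pyRange 0 (ws.length : Int)).filter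
            (fun j => PySem.List.pyGetD w (-1) "" ==
              PySem.List.pyGetD (PySem.List.pyGetD ws j []) 0 "")).map
          (fun j => PySem.List.slice w none (some (-1)) ++ PySem.List.pyGetD ws j [])))
      (List.flatMap_congr (fun w _ => pyFilterMapIdx ws []
        (fun m => PySem.List.pyGetD w (-1) "" == PySem.List.pyGetD m 0 "")
        (fun m => PySem.List.slice w none (some (-1)) ++ m))))) ?_
  simp only [List.map_flatMap, List.map_map, Function.comp_def]
  exact List.flatMap_congr (fun w _ =>
    congrArg (List.map (fun m => PySem.Str.join " " (PySem.List.slice w none (some (-1)) ++ m)))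
      (List.filter_congr (fun m _ => Bool.beq_comm)))

-- ===== VERDICT (by name: the statement is the Claim_ definition above) =====
theorem solution_spec : Claim_equal_solution := by
  intro phrases _
  unfold Spec_solution
  exact solution_spec_aux phrases
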